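-- pv_equiv track=rewrite | github.com/boisgera/eul-ink | docs/complex-analysis/Line Integrals & Primitives/images/main.py | peano_seq
-- ===== SOURCE A (Python) =====
-- def peano_seq(n=1, seq=None):
--     if seq is None:
--         seq = [(1,1),(-1,1),(1,1),(1,-1),(-1,-1), (1,-1),(1, 1),(-1,1),(1,1)]
--     if n==1:
--         return seq
--     else:
--         seq2 = []
--         for (i, j) in seq:
--             sseq = [(i*x, j*y) for (x, y) in seq]
--             seq2.extend(sseq)
--         return peano_seq(n-1, seq2)
-- ===== SOURCE B (Python) =====
-- def peano_seq(n=1, seq=None):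
--     if seq is None:
--         seq = [(1,1),(-1,1),(1,1),(1,-1),(-1,-1),(1,-1),(1,1),(-1,1),(1,1)]
--     for _ in range(n - 1):
--         seq = [(i*x, j*y) for (i, j) in seq for (x, y) in seq]
--     return seq
-- ===== Notes on version B (the rewrite author's own statement) =====
-- stated objective: idiomatic
-- what changed: Replaces the tail recursion (with an explicit accumulator loop building seq2 via extend) by a single for-loop over range(n-1) rebuilding seq with one flat comprehension each pass.
import Mathlib
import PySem

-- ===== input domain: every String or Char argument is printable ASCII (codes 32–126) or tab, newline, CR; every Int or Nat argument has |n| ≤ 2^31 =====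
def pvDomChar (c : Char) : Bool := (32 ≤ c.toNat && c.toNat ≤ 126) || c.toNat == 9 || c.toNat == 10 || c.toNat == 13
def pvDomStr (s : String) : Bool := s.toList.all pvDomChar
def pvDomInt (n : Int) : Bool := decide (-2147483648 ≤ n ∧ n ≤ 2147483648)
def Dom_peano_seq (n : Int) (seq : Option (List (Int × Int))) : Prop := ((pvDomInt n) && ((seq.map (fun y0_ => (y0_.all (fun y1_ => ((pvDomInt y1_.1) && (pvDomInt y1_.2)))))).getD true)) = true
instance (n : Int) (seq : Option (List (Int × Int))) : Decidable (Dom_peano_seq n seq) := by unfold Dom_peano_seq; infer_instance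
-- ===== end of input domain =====

-- B replaces A's tail recursion by an idiomatic for-loop over range(n-1) with a single
-- flat comprehension per pass; return values agree for n ≥ 1 (for n ≤ 0 A diverges; Pre_ excludes those).

-- ===== PORT A =====
-- default value of the `seq` parameter
def peanoDefault : List (Int × Int) :=
  [(1,1),(-1,1),(1,1),(1,-1),(-1,-1),(1,-1),(1,1),(-1,1),(1,1)]

-- A's tail recursion, made total with a Nat fuel (the fuel branch is reachable only for n ≤ 0,
-- where the Python recurses without a base case; those inputs are outside Pre_).
def peanoA_go : Nat → Int → List (Int × Int) → List (Int × Int)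
  | 0, _, seq => seq
  | fuel + 1, n, seq =>
    if n = 1 then seq
    else
      -- seq2 = []; for (i,j) in seq: seq2.extend([(i*x, j*y) for (x,y) in seq])
      let seq2 := seq.foldl
        (fun seq2 ij => seq2 ++ seq.map (fun xy => (ij.1 * xy.1, ij.2 * xy.2))) []
      peanoA_go fuel (n - 1) seq2

def peano_seq (n : Int) (seq : Option (List (Int × Int))) : List (Int × Int) :=
  peanoA_go n.toNat n (seq.getD peanoDefault)

-- ===== PORT B =====
def peano_seq_alt (n : Int) (seq : Option (List (Int × Int))) : List (Int × Int) :=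
  -- for _ in range(n - 1): seq = [(i*x, j*y) for (i,j) in seq for (x,y) in seq]
  (PySem.List.pyRange 0 (n - 1) 1).foldl
    (fun s _ => s.flatMap (fun ij => s.map (fun xy => (ij.1 * xy.1, ij.2 * xy.2))))
    (seq.getD peanoDefault)

-- ===== PRECONDITION & SPEC =====
-- Pre_ excludes n ≤ 0, on which A recurses with no base case and never returns.
def Pre_peano_seq (n : Int) (seq : Option (List (Int × Int))) : Prop := 1 ≤ n
instance (n : Int) (seq : Option (List (Int × Int))) : Decidable (Pre_peano_seq n seq) := by
  unfold Pre_peano_seq; infer_instance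

def pvWitness_peano_seq : Int × (Option (List (Int × Int))) := (2, none)


def Spec_peano_seq (n : Int) (seq : Option (List (Int × Int))) (out : List (Int × Int)) : Prop :=
  out = peano_seq_alt n seq
instance (n : Int) (seq : Option (List (Int × Int))) (out : List (Int × Int)) :
    Decidable (Spec_peano_seq n seq out) := by unfold Spec_peano_seq; infer_instance

-- ===== CLAIM (what is proved, stated in full; the proofs are below) =====
def Claim_equal_peano_seq : Prop := ∀ (n : Int) (seq : Option (List (Int × Int))),
  Dom_peano_seq n seq → Pre_peano_seq n seq → Spec_peano_seq n seq (peano_seq n seq)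


-- ===== LEMMAS AND PROOFS =====

-- one pass of the rewrite, in B's form
def peanoStep (s : List (Int × Int)) : List (Int × Int) :=
  s.flatMap (fun ij => s.map (fun xy => (ij.1 * xy.1, ij.2 * xy.2)))

-- A's inner accumulator loop computes exactly B's flat comprehension
lemma stepA_eq (s : List (Int × Int)) :
    s.foldl (fun seq2 ij => seq2 ++ s.map (fun xy => (ij.1 * xy.1, ij.2 * xy.2))) [] =
      peanoStep s := by
  simpa [peanoStep] using
    PySem.List.foldl_append_eq_flatMap
      (fun ij => s.map (fun xy => (ij.1 * xy.1, ij.2 * xy.2))) s []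

-- a foldl whose body ignores the list elements just iterates the step
lemma foldl_const_iterate (l : List Int) (f : List (Int × Int) → List (Int × Int))
    (s : List (Int × Int)) :
    l.foldl (fun s _ => f s) s = f^[l.length] s := by
  induction l generalizing s with
  | nil => rfl
  | cons a t ih => simp [List.foldl_cons, ih, Function.iterate_succ_apply]

lemma goA_iterate : ∀ (k : Nat) (s : List (Int × Int)),
    peanoA_go (k + 1) ((k : Int) + 1) s = peanoStep^[k] s := by
  intro k
  induction k with
  | zero => intro s; simp [peanoA_go]
  | succ m ih =>
    intro s
    have h1 : ((m + 1 : Nat) : Int) + 1 = (m : Int) + 1 + 1 := by push_cast; ring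
    have hne : ¬ ((m : Int) + 1 + 1 = 1) := by omega
    have h2 : (m : Int) + 1 + 1 - 1 = (m : Int) + 1 := by ring
    rw [h1, peanoA_go, if_neg hne, stepA_eq, h2, ih, ← Function.iterate_succ_apply]

theorem peano_seq_eq (n : Int) (seq : Option (List (Int × Int))) (hn : 1 ≤ n) :
    peano_seq n seq = peano_seq_alt n seq := by
  obtain ⟨k, hk⟩ : ∃ k : Nat, n = (k : Int) + 1 := ⟨(n - 1).toNat, by omega⟩
  subst hk
  have htn : ((k : Int) + 1).toNat = k + 1 := by omega
  unfold peano_seq peano_seq_alt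
  rw [htn, goA_iterate]
  have h := foldl_const_iterate (PySem.List.pyRange 0 ((k : Int) + 1 - 1) 1) peanoStep
    (seq.getD peanoDefault)
  rw [PySem.List.length_pyRange_one, show ((k : Int) + 1 - 1 - 0).toNat = k by omega] at h
  exact h.symm

-- ===== VERDICT (by name: the statement is the Claim_ definition above) =====
theorem peano_seq_spec : Claim_equal_peano_seq := by
  intro n seq _ hpre
  unfold Spec_peano_seq
  exact peano_seq_eq n seq hpre
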